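-- pv_equiv track=rewrite | github.com/yagoTobi/Second-Term-ICAI-5th-Year | Deep Learning/test.py | func
-- ===== SOURCE A (Python) =====
-- def func(n):
--     c = 0
--     counter = 0
--     while (n>=0):
--         n = n - 2
--         c = c + n - 2
--         counter = counter + 1
--     return c, counter
-- ===== SOURCE B (Python) =====
-- def func(n):
--     # Closed form: the loop runs m = n//2 + 1 times (0 if n < 0),
--     # and c = sum_{k=1..m} (n - 2k - 2) = m*(n - m - 3).
--     if n < 0:
--         return 0, 0
--     m = n // 2 + 1
--     return m * (n - m - 3), m
-- ===== Notes on version B (the rewrite author's own statement) =====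
-- stated objective: faster
-- what changed: Replaces the while loop with a constant-time closed form: the iteration count is computed by floor division and c by the arithmetic-series sum.
import Mathlib
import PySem

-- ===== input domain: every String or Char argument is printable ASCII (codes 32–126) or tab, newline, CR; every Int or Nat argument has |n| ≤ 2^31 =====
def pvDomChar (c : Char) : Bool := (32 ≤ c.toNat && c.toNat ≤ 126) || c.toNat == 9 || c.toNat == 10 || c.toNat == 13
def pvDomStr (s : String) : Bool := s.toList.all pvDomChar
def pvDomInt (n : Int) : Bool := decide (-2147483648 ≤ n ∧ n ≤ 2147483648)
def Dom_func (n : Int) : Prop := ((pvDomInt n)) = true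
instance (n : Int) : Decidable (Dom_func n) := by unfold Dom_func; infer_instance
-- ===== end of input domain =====

-- B replaces A's O(n) while loop by an O(1) closed form (counter = n//2 + 1, c via the arithmetic-series sum).

-- ===== PORT A =====
-- the while loop of A, carrying the same state (n, c, counter)
def funcLoop (n c counter : Int) : Int × Int :=
  if n ≥ 0 then
    funcLoop (n - 2) (c + (n - 2) - 2) (counter + 1)
  else
    (c, counter)
termination_by (n + 2).toNat
decreasing_by omega

def func (n : Int) : Int × Int := funcLoop n 0 0

-- ===== PORT B =====
def func_alt (n : Int) : Int × Int :=
  if n < 0 then (0, 0)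
  else
    let m := PySem.Int.floordiv n 2 + 1
    (m * (n - m - 3), m)

-- ===== PRECONDITION & SPEC =====
def Spec_func (n : Int) (out : Int × Int) : Prop := out = func_alt n
instance (n : Int) (out : Int × Int) : Decidable (Spec_func n out) := by unfold Spec_func; infer_instance

-- ===== CLAIM (what is proved, stated in full; the proofs are below) =====
def Claim_equal_func : Prop := ∀ (n : Int), Dom_func n → Spec_func n (func n)

-- ===== LEMMAS AND PROOFS =====

lemma funcLoop_closed (n c counter : Int) :
    funcLoop n c counter =
      if n < 0 then (c, counter)
      else (c + (n / 2 + 1) * (n - (n / 2 + 1) - 3), counter + (n / 2 + 1)) := by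
  induction n, c, counter using funcLoop.induct with
  | case1 n c counter h ih =>
    rw [funcLoop, if_pos h, ih]
    by_cases h2 : n - 2 < 0
    · rw [if_pos h2, if_neg (by omega)]
      have hm : n / 2 = 0 := by omega
      simp only [hm, Prod.mk.injEq]
      constructor <;> ring_nf
    · rw [if_neg h2, if_neg (by omega)]
      have hm : (n - 2) / 2 = n / 2 - 1 := by omega
      simp only [hm, Prod.mk.injEq]
      constructor <;> ring
  | case2 n c counter h =>
    rw [funcLoop, if_neg h, if_pos (by omega)]

-- ===== VERDICT (by name: the statement is the Claim_ definition above) =====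
theorem func_spec : Claim_equal_func := by
  intro n _
  unfold Spec_func func func_alt
  rw [funcLoop_closed]
  split_ifs with h
  · rfl
  · simp
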